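-- pv_equiv track=rewrite | github.com/Jerrymwolf/ValuesQualCoder | src/agents/coordinator_agent.py | _generate_quality_recommendations
-- ===== SOURCE A (Python) =====
-- from typing import Dict, Any, List
--
-- def _generate_quality_recommendations(issues: List[str]) -> List[str]:
--     """Generate recommendations based on quality issues"""
--     recommendations = []
--
--     for issue in issues:
--         if 'too short' in issue.lower():
--             recommendations.append('Consider merging short segments with adjacent content')
--         elif 'too long' in issue.lower():
--             recommendations.append('Break down long segments into smaller, coherent units')
--         elif 'low confidence' in issue.lower():
--             recommendations.append('Review low confidence items for potential re-coding')
--         elif 'no values' in issue.lower():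
--             recommendations.append('Verify document contains value-relevant content')
--
--     return recommendations
-- ===== SOURCE B (Python) =====
-- from typing import List
--
-- _RULES = [
--     ('too short', 'Consider merging short segments with adjacent content'),
--     ('too long', 'Break down long segments into smaller, coherent units'),
--     ('low confidence', 'Review low confidence items for potential re-coding'),
--     ('no values', 'Verify document contains value-relevant content'),
-- ]
--
-- def _generate_quality_recommendations(issues: List[str]) -> List[str]:
--     # Rule-major staged sweeps: each rule makes one pass over all issues,
--     # filling a per-issue slot only if no earlier rule already claimed it
--     # (which reproduces the elif precedence); finally compact the slots.
--     lows = [issue.lower() for issue in issues]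
--     slots = [None] * len(lows)
--     for sub, rec in _RULES:
--         for i, low in enumerate(lows):
--             if slots[i] is None and sub in low:
--                 slots[i] = rec
--     return [rec for rec in slots if rec is not None]
-- ===== Notes on version B (the rewrite author's own statement) =====
-- stated objective: alternative
-- what changed: Inverts the traversal: instead of A's per-issue if/elif chain, B makes one sweep over all issues per rule (rule-major order), filling a slots array where earlier rules block later ones, then compacts the slots.
import Mathlib
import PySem

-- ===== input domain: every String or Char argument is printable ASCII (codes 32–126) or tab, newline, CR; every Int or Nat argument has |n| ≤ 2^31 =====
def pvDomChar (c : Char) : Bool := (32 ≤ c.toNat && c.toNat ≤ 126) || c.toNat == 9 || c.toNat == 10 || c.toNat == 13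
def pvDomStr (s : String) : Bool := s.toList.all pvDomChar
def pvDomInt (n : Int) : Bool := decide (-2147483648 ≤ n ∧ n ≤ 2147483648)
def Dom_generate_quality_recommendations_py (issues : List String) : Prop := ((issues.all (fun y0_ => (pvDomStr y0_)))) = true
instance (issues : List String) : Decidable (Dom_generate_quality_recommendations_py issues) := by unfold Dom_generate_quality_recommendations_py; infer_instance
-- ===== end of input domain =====

-- B inverts the traversal (one sweep over all issues per rule, slots array, then compact) instead of A's per-issue if/elif chain; alternative decomposition, same cost.

-- ===== PORT A =====
def generate_quality_recommendations_py (issues : List String) : List String :=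
  issues.foldl (fun recommendations issue =>
    if PySem.Str.isIn "too short" (PySem.Str.lower issue) then
      recommendations ++ ["Consider merging short segments with adjacent content"]
    else if PySem.Str.isIn "too long" (PySem.Str.lower issue) then
      recommendations ++ ["Break down long segments into smaller, coherent units"]
    else if PySem.Str.isIn "low confidence" (PySem.Str.lower issue) then
      recommendations ++ ["Review low confidence items for potential re-coding"]
    else if PySem.Str.isIn "no values" (PySem.Str.lower issue) then
      recommendations ++ ["Verify document contains value-relevant content"]
    else recommendations) []

-- ===== PORT B =====
def pvRules : List (String × String) :=
  [("too short", "Consider merging short segments with adjacent content"),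
   ("too long", "Break down long segments into smaller, coherent units"),
   ("low confidence", "Review low confidence items for potential re-coding"),
   ("no values", "Verify document contains value-relevant content")]

-- fill one slot: only if no earlier rule already claimed it
def pvFill (lo : String) (s : Option String) (r : String × String) : Option String :=
  if s.isNone && PySem.Str.isIn r.1 lo then some r.2 else s

-- one rule's sweep over all issues (Source B's inner 'for i, low in enumerate(lows)' updating slots[i])
def pvApplyRule (r : String × String) (lows : List String) (slots : List (Option String)) : List (Option String) :=
  List.zipWith (fun lo s => pvFill lo s r) lows slots

def generate_quality_recommendations_py_alt (issues : List String) : List String :=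
  let lows := issues.map PySem.Str.lower
  let slots := pvRules.foldl (fun sl r => pvApplyRule r lows sl) (lows.map (fun _ => none))
  slots.filterMap id

-- ===== PRECONDITION & SPEC =====
def Spec_generate_quality_recommendations_py (issues : List String) (out : List String) : Prop := out = generate_quality_recommendations_py_alt issues
instance (issues : List String) (out : List String) : Decidable (Spec_generate_quality_recommendations_py issues out) := by unfold Spec_generate_quality_recommendations_py; infer_instance

-- ===== CLAIM (what is proved, stated in full; the proofs are below) =====
def Claim_equal_generate_quality_recommendations_py : Prop := ∀ (issues : List String), Dom_generate_quality_recommendations_py issues → Spec_generate_quality_recommendations_py issues (generate_quality_recommendations_py issues)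

-- ===== LEMMAS AND PROOFS =====

-- the value rule-major filling ends up with at one fixed slot
def pvChoice (issue : String) : Option String :=
  pvRules.foldl (pvFill (PySem.Str.lower issue)) none

-- the rule-major fold acts elementwise on the slots list
theorem pv_fold_apply_cons (rules : List (String × String)) (lo : String) (lows : List String)
    (s : Option String) (slots : List (Option String)) :
    rules.foldl (fun sl r => pvApplyRule r (lo :: lows) sl) (s :: slots)
      = (rules.foldl (pvFill lo) s) :: rules.foldl (fun sl r => pvApplyRule r lows sl) slots := by
  induction rules generalizing s slots with
  | nil => simp
  | cons r rs ih => simpa [pvApplyRule] using ih (pvFill lo s r) (pvApplyRule r lows slots)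

theorem pv_fold_apply_nil (rules : List (String × String)) :
    rules.foldl (fun sl r => pvApplyRule r ([] : List String) sl) [] = [] := by
  induction rules with
  | nil => rfl
  | cons r rs ih => simpa [pvApplyRule] using ih

-- B computes the per-issue first-match results in input order
theorem pv_alt_eq (issues : List String) :
    generate_quality_recommendations_py_alt issues = issues.filterMap pvChoice := by
  induction issues with
  | nil => simp [generate_quality_recommendations_py_alt, pv_fold_apply_nil]
  | cons x xs ih =>
    simp only [generate_quality_recommendations_py_alt, List.map_cons] at ih ⊢
    rw [pv_fold_apply_cons, List.filterMap_cons]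
    cases h : pvChoice x <;>
      simp_all [pvChoice]

-- A's if/elif chain on one issue appends exactly pvChoice of that issue
theorem pv_step_eq (recommendations : List String) (issue : String) :
    (if PySem.Str.isIn "too short" (PySem.Str.lower issue) then
      recommendations ++ ["Consider merging short segments with adjacent content"]
    else if PySem.Str.isIn "too long" (PySem.Str.lower issue) then
      recommendations ++ ["Break down long segments into smaller, coherent units"]
    else if PySem.Str.isIn "low confidence" (PySem.Str.lower issue) then
      recommendations ++ ["Review low confidence items for potential re-coding"]
    else if PySem.Str.isIn "no values" (PySem.Str.lower issue) then
      recommendations ++ ["Verify document contains value-relevant content"]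
    else recommendations) = recommendations ++ (pvChoice issue).toList := by
  simp only [pvChoice, pvRules, List.foldl_cons, List.foldl_nil]
  split_ifs with h1 h2 h3 h4 <;> simp_all [pvFill]

theorem pv_foldl_eq (issues : List String) (acc : List String) :
    issues.foldl (fun recommendations issue =>
      if PySem.Str.isIn "too short" (PySem.Str.lower issue) then
        recommendations ++ ["Consider merging short segments with adjacent content"]
      else if PySem.Str.isIn "too long" (PySem.Str.lower issue) then
        recommendations ++ ["Break down long segments into smaller, coherent units"]
      else if PySem.Str.isIn "low confidence" (PySem.Str.lower issue) then
        recommendations ++ ["Review low confidence items for potential re-coding"]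
      else if PySem.Str.isIn "no values" (PySem.Str.lower issue) then
        recommendations ++ ["Verify document contains value-relevant content"]
      else recommendations) acc = acc ++ issues.filterMap pvChoice := by
  induction issues generalizing acc with
  | nil => simp
  | cons x xs ih =>
    rw [List.foldl_cons, pv_step_eq, ih, List.filterMap_cons]
    cases pvChoice x <;> simp

-- ===== VERDICT (by name: the statement is the Claim_ definition above) =====
theorem generate_quality_recommendations_py_spec : Claim_equal_generate_quality_recommendations_py := by
  intro issues _
  show generate_quality_recommendations_py issues = generate_quality_recommendations_py_alt issues
  rw [generate_quality_recommendations_py, pv_foldl_eq, pv_alt_eq, List.nil_append]
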